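-- pv_equiv track=rewrite | github.com/evo-design/evo | semantic_design/bin/t3ta_structure_comparison.py | structure_to_kmer_features
-- ===== SOURCE A (Python) =====
-- def structure_to_kmer_features(structure: str, k: int = 3) -> str:
--     """Represent a dot-bracket structure as a bag of structural k-mers."""
--     if not structure:
--         return ""
--
--     # Create k-mers from STRUCTURE (dot-bracket notation)
--     # This captures structural motifs like "(((" or ").))"
--     kmers = []
--     for i in range(len(structure) - k + 1):
--         kmer = structure[i : i + k]
--         # Only include k-mers with structural information
--         if any(c in kmer for c in "()"):
--             kmers.append(kmer)
--
--     return " ".join(kmers)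
-- ===== SOURCE B (Python) =====
-- def structure_to_kmer_features(structure: str, k: int = 3) -> str:
--     """Represent a dot-bracket structure as a bag of structural k-mers."""
--     if not structure:
--         return ""
--     n = len(structure)
--     if k <= 0 or k > n:
--         return ""
--     # sliding-window count of brackets in the current k-window
--     cnt = sum(1 for c in structure[:k] if c in "()")
--     kmers = []
--     for i in range(n - k + 1):
--         if cnt > 0:
--             kmers.append(structure[i:i + k])
--         if i + k < n:
--             cnt += (structure[i + k] in "()") - (structure[i] in "()")
--     return " ".join(kmers)
-- ===== Notes on version B (the rewrite author's own statement) =====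
-- stated objective: faster
-- what changed: Replaces the per-k-mer character scan for brackets with an incrementally maintained sliding-window bracket count (plus an explicit early return for degenerate k), appending a slice exactly when the window's count is positive.
-- intended difference: For k < 0 on a structure longer than -k whose non-final characters include a bracket, A's slice with negative stop wraps around Python-style and A returns accidental junk k-mers, while B returns the empty string, the intended value since k-mers of negative length do not exist. — e.g. on structure_to_kmer_features("(.", -1): A returns "(", B returns ""
import Mathlib
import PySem

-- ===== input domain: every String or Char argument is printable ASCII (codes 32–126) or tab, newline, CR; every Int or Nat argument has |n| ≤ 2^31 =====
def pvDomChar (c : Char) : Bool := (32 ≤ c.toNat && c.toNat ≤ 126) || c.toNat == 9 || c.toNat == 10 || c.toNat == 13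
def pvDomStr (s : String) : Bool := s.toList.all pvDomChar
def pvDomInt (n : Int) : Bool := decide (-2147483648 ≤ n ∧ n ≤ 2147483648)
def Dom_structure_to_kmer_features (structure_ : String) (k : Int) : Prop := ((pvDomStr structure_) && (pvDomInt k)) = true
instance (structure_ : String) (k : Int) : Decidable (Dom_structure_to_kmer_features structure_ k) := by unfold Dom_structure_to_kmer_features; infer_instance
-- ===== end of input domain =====

-- B replaces A's per-window bracket scan by an incrementally maintained sliding bracket count
-- (objective: faster, measured); for k < 0 A's slices wrap around
-- Python-style and return junk k-mers while B returns the empty string (see D_ below).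


-- ===== PORT A =====
-- the 'for i in range(...)' loop of A, recursing over the index list
def pvAGo (cs : List Char) (k : Int) : List Int → List (List Char) → List (List Char)
  | [], kmers => kmers
  | i :: rest, kmers =>
    let kmer := PySem.List.slice cs (some i) (some (i + k))
    -- any(c in kmer for c in "()")  =  '(' in kmer or ')' in kmer
    if kmer.contains '(' || kmer.contains ')' then
      pvAGo cs k rest (kmers ++ [kmer])
    else
      pvAGo cs k rest kmers

def structure_to_kmer_features (structure_ : String) (k : Int) : String :=
  if PySem.Str.len structure_ = 0 then ""
  else
    let cs := structure_.toList
    let kmers := pvAGo cs k (PySem.List.pyRange 0 ((cs.length : Int) - k + 1) 1) []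
    String.ofList (PySem.Chars.join [' '] kmers)

-- ===== PORT B =====
def pvIsBr (c : Char) : Bool := c == '(' || c == ')'

-- B's loop: carries the sliding bracket count of the current window
def pvBGo (cs : List Char) (k n : Int) : List Int → Int → List (List Char) → List (List Char)
  | [], _, kmers => kmers
  | i :: rest, cnt, kmers =>
    let kmers' := if 0 < cnt then kmers ++ [PySem.List.slice cs (some i) (some (i + k))] else kmers
    -- indices i and i+k are in range whenever the guard i+k < n holds, so pyGetD's default is never used
    let cnt' := if i + k < n then
        cnt + (if pvIsBr (PySem.List.pyGetD cs (i + k) ' ') then 1 else 0)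
            - (if pvIsBr (PySem.List.pyGetD cs i ' ') then 1 else 0)
      else cnt
    pvBGo cs k n rest cnt' kmers'

def structure_to_kmer_features_alt (structure_ : String) (k : Int) : String :=
  if PySem.Str.len structure_ = 0 then ""
  else
    let cs := structure_.toList
    let n : Int := cs.length
    if k ≤ 0 ∨ n < k then ""
    else
      -- sum(1 for c in structure[:k] if c in "()")
      let cnt0 : Int := ((PySem.List.slice cs none (some k)).countP pvIsBr : Nat)
      let kmers := pvBGo cs k n (PySem.List.pyRange 0 (n - k + 1) 1) cnt0 []
      String.ofList (PySem.Chars.join [' '] kmers)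

-- ===== PRECONDITION & SPEC =====
-- For k < 0 on a structure longer than -k whose non-final characters include a bracket, A's
-- slice with negative stop wraps around Python-style and A returns accidental junk k-mers;
-- B returns the empty string there, the intended value since k-mers of negative length do not exist.
def D_structure_to_kmer_features (structure_ : String) (k : Int) : Prop :=
  k < 0 ∧ 1 ≤ (structure_.toList.length : Int) + k ∧
    structure_.toList.dropLast.any (fun c => c == '(' || c == ')') = true
instance (structure_ : String) (k : Int) : Decidable (D_structure_to_kmer_features structure_ k) := by
  unfold D_structure_to_kmer_features; infer_instance

def Spec_structure_to_kmer_features (structure_ : String) (k : Int) (out : String) : Prop :=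
  ¬ D_structure_to_kmer_features structure_ k → out = structure_to_kmer_features_alt structure_ k
instance (structure_ : String) (k : Int) (out : String) : Decidable (Spec_structure_to_kmer_features structure_ k out) := by
  unfold Spec_structure_to_kmer_features; infer_instance

def pvDiffWitness_structure_to_kmer_features : String × Int := ("(.", -1)
def pvDiffWitnessOut_structure_to_kmer_features : String × String := ("(", "")

-- ===== CLAIM (what is proved, stated in full; the proofs are below) =====
def Claim_unchanged_structure_to_kmer_features : Prop := ∀ (structure_ : String) (k : Int), Dom_structure_to_kmer_features structure_ k → Spec_structure_to_kmer_features structure_ k (structure_to_kmer_features structure_ k)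
def Claim_changed_structure_to_kmer_features : Prop := Dom_structure_to_kmer_features (pvDiffWitness_structure_to_kmer_features.1) (pvDiffWitness_structure_to_kmer_features.2) ∧ D_structure_to_kmer_features (pvDiffWitness_structure_to_kmer_features.1) (pvDiffWitness_structure_to_kmer_features.2) ∧ structure_to_kmer_features (pvDiffWitness_structure_to_kmer_features.1) (pvDiffWitness_structure_to_kmer_features.2) = pvDiffWitnessOut_structure_to_kmer_features.1 ∧ structure_to_kmer_features_alt (pvDiffWitness_structure_to_kmer_features.1) (pvDiffWitness_structure_to_kmer_features.2) = pvDiffWitnessOut_structure_to_kmer_features.2 ∧ pvDiffWitnessOut_structure_to_kmer_features.1 ≠ pvDiffWitnessOut_structure_to_kmer_features.2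

def Claim_exact_structure_to_kmer_features : Prop := ∀ (structure_ : String) (k : Int), Dom_structure_to_kmer_features structure_ k → D_structure_to_kmer_features structure_ k → structure_to_kmer_features structure_ k ≠ structure_to_kmer_features_alt structure_ k

-- ===== LEMMAS AND PROOFS =====

lemma pvBr_iff (l : List Char) :
    (l.contains '(' || l.contains ')') = true ↔ (0:Int) < (l.countP pvIsBr : Nat) := by
  have h0 : (0:Int) < (l.countP pvIsBr : Nat) ↔ 0 < l.countP pvIsBr := by exact_mod_cast Iff.rfl
  rw [h0, List.countP_pos_iff]
  simp [pvIsBr, List.contains_eq_mem]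
  constructor
  · rintro (h | h)
    exacts [⟨'(', h, Or.inl rfl⟩, ⟨')', h, Or.inr rfl⟩]
  · rintro ⟨c, hc, (rfl | rfl)⟩
    exacts [Or.inl hc, Or.inr hc]

lemma pvSlide (cs : List Char) (K j : Nat) (hK : 1 ≤ K) (h : j + K < cs.length) :
    ((((cs.drop (j+1)).take K).countP pvIsBr : Nat) : Int)
      = (((cs.drop j).take K).countP pvIsBr : Nat)
        + (if pvIsBr (cs[j+K]'(by omega)) then 1 else 0)
        - (if pvIsBr (cs[j]'(by omega)) then 1 else 0) := by
  obtain ⟨K', rfl⟩ : ∃ K', K = K' + 1 := ⟨K - 1, by omega⟩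
  have hj : j < cs.length := by omega
  have hidx : j + 1 + K' = j + (K' + 1) := by omega
  have hdj : cs.drop j = cs[j] :: cs.drop (j+1) := List.drop_eq_getElem_cons hj
  have htk : (cs.drop (j+1)).take (K' + 1)
      = (cs.drop (j+1)).take K' ++ [cs[j + (K'+1)]'(by omega)] := by
    rw [List.take_add_one]
    congr 1
    have hg : (cs.drop (j+1))[K']? = some (cs[j + (K'+1)]'(by omega)) := by
      rw [List.getElem?_drop, List.getElem?_eq_getElem (by omega : j + 1 + K' < cs.length)]
      exact congrArg some (getElem_congr_idx hidx)
    simp [hg]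
  rw [htk, hdj, List.take_succ_cons]
  simp only [List.countP_cons, List.countP_append]
  by_cases h1 : pvIsBr cs[j] <;> by_cases h2 : pvIsBr (cs[j + (K'+1)]'(by omega)) <;>
    simp [h1, h2]

lemma pvAGo_eq_of_nobr (cs : List Char) (k : Int) :
    ∀ (idxs : List Int) (kmers : List (List Char)),
      (∀ i ∈ idxs, ∀ c ∈ PySem.List.slice cs (some i) (some (i + k)), pvIsBr c = false) →
      pvAGo cs k idxs kmers = kmers
  | [], kmers, _ => rfl
  | i :: rest, kmers, h => by
    have hcond : ((PySem.List.slice cs (some i) (some (i + k))).contains '('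
        || (PySem.List.slice cs (some i) (some (i + k))).contains ')') = false := by
      rw [Bool.or_eq_false_iff]
      constructor <;> {
        rw [← Bool.not_eq_true, List.contains_eq_mem]
        simp only [decide_eq_true_eq]
        intro hm
        have := h i (List.mem_cons_self ..) _ hm
        simp [pvIsBr] at this
      }
    simp only [pvAGo, hcond, Bool.false_eq_true, if_false]
    exact pvAGo_eq_of_nobr cs k rest kmers (fun i' hi' => h i' (List.mem_cons_of_mem _ hi'))


lemma pvAGo_cons_pos (cs : List Char) (k i : Int) (rest : List Int) (kmers : List (List Char))
    (h : ((PySem.List.slice cs (some i) (some (i + k))).contains '('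
        || (PySem.List.slice cs (some i) (some (i + k))).contains ')') = true) :
    pvAGo cs k (i :: rest) kmers
      = pvAGo cs k rest (kmers ++ [PySem.List.slice cs (some i) (some (i + k))]) := by
  simp only [pvAGo, h, if_true]

lemma pvAGo_cons_neg (cs : List Char) (k i : Int) (rest : List Int) (kmers : List (List Char))
    (h : ((PySem.List.slice cs (some i) (some (i + k))).contains '('
        || (PySem.List.slice cs (some i) (some (i + k))).contains ')') = false) :
    pvAGo cs k (i :: rest) kmers = pvAGo cs k rest kmers := by
  simp only [pvAGo, h, Bool.false_eq_true, if_false]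

lemma pvBGo_cons (cs : List Char) (k n i : Int) (rest : List Int) (cnt : Int)
    (kmers : List (List Char)) :
    pvBGo cs k n (i :: rest) cnt kmers
      = pvBGo cs k n rest
          (if i + k < n then
              cnt + (if pvIsBr (PySem.List.pyGetD cs (i + k) ' ') then 1 else 0)
                  - (if pvIsBr (PySem.List.pyGetD cs i ' ') then 1 else 0)
            else cnt)
          (if 0 < cnt then kmers ++ [PySem.List.slice cs (some i) (some (i + k))] else kmers) := by
  simp only [pvBGo]

lemma pvMain (cs : List Char) (K : Nat) (hK : 1 <= K) (hKn : K <= cs.length) :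
    ∀ (fuel j : Nat) (kmers : List (List Char)),
      cs.length - K + 1 <= j + fuel →
      pvBGo cs (K : Int) (cs.length : Int)
          (PySem.List.pyRange (j : Int) ((cs.length : Int) - (K : Int) + 1) 1)
          (((cs.drop j).take K).countP pvIsBr : Nat) kmers
        = pvAGo cs (K : Int)
            (PySem.List.pyRange (j : Int) ((cs.length : Int) - (K : Int) + 1) 1) kmers := by
  intro fuel
  induction fuel with
  | zero =>
    intro j kmers hle
    rw [PySem.List.pyRange_one_eq_nil (by push_cast; omega)]
    rfl
  | succ f ih =>
    intro j kmers hle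
    by_cases hj : (j : Int) < (cs.length : Int) - (K : Int) + 1
    · rw [PySem.List.pyRange_one_cons hj]
      have hjn : j + K <= cs.length := by push_cast at hj; omega
      have hsl : PySem.List.slice cs (some (j : Int)) (some ((j : Int) + (K : Int)))
          = (cs.drop j).take K := by
        exact_mod_cast PySem.List.slice_natCast_add cs j K
      have hnext : ((j : Int) + 1) = (((j + 1 : Nat)) : Int) := by push_cast; ring
      -- the updated count equals the bracket count of the next window (when there IS a next step)
      have hcnt' : ∀ (hlt : (j : Int) + (K : Int) < (cs.length : Int)),
          ((((cs.drop j).take K).countP pvIsBr : Nat) : Int)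
            + (if pvIsBr (PySem.List.pyGetD cs ((j : Int) + (K : Int)) ' ') then 1 else 0)
            - (if pvIsBr (PySem.List.pyGetD cs (j : Int) ' ') then 1 else 0)
          = (((cs.drop (j+1)).take K).countP pvIsBr : Nat) := by
        intro hlt
        have hjKlt : j + K < cs.length := by exact_mod_cast hlt
        have hg1 : PySem.List.pyGetD cs ((j : Int) + (K : Int)) ' '
            = cs[j + K]'(by omega) := by
          rw [PySem.List.pyGetD_eq_getElem cs ' ' (by positivity) (by push_cast; omega)]
          exact getElem_congr_idx (by push_cast; omega)
        have hg2 : PySem.List.pyGetD cs (j : Int) ' ' = cs[j]'(by omega) := by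
          rw [PySem.List.pyGetD_eq_getElem cs ' ' (by positivity) (by push_cast; omega)]
          exact getElem_congr_idx (by simp)
        rw [hg1, hg2, pvSlide cs K j hK hjKlt]
      by_cases hcnt : (0:Int) < (((cs.drop j).take K).countP pvIsBr : Nat)
      · have hA : (((cs.drop j).take K).contains '(' || ((cs.drop j).take K).contains ')') = true :=
          (pvBr_iff _).mpr hcnt
        rw [pvBGo_cons, pvAGo_cons_pos cs _ _ _ _ (by rw [hsl]; exact hA), hsl, if_pos hcnt]
        by_cases hlt : (j : Int) + (K : Int) < (cs.length : Int)
        · rw [if_pos hlt, hcnt' hlt, hnext]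
          exact ih (j+1) _ (by omega)
        · rw [if_neg hlt]
          have hend : ((j:Int) + 1) = (cs.length : Int) - (K:Int) + 1 := by
            push_cast at hj hlt ⊢; omega
          rw [hend, PySem.List.pyRange_one_eq_nil (le_refl _)]
          rfl
      · have hA : (((cs.drop j).take K).contains '(' || ((cs.drop j).take K).contains ')') = false := by
          rw [← Bool.not_eq_true]
          intro hc
          exact hcnt ((pvBr_iff _).mp hc)
        rw [pvBGo_cons, pvAGo_cons_neg cs _ _ _ _ (by rw [hsl]; exact hA), if_neg hcnt]
        by_cases hlt : (j : Int) + (K : Int) < (cs.length : Int)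
        · rw [if_pos hlt, hcnt' hlt, hnext]
          exact ih (j+1) _ (by omega)
        · rw [if_neg hlt]
          have hend : ((j:Int) + 1) = (cs.length : Int) - (K:Int) + 1 := by
            push_cast at hj hlt ⊢; omega
          rw [hend, PySem.List.pyRange_one_eq_nil (le_refl _)]
          rfl
    · rw [PySem.List.pyRange_one_eq_nil (by omega)]
      rfl
-- slice is empty when the clamped stop does not exceed the clamped start
lemma pvSliceNil (cs : List Char) (i k : Int)
    (hba : PySem.List.clampIdx cs.length (i + k) ≤ PySem.List.clampIdx cs.length i) :
    PySem.List.slice cs (some i) (some (i + k)) = [] := by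
  simp only [PySem.List.slice]
  rw [Nat.sub_eq_zero_of_le hba, List.take_zero]

lemma pvClampLe (n : Nat) (i k : Int) (h0 : 0 ≤ i) (hk : k ≤ 0)
    (h : k = 0 ∨ (n : Int) + k ≤ 0) :
    PySem.List.clampIdx n (i + k) ≤ PySem.List.clampIdx n i := by
  simp only [PySem.List.clampIdx]
  split_ifs <;> omega

lemma pvMemTake (cs : List Char) (a t : Nat) (x : Char) (hx : x ∈ (cs.drop a).take t) :
    x ∈ cs.take (a + t) := by
  have : (cs.drop a).take t = (cs.take (a + t)).drop a := by
    rw [List.drop_take]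
    congr 1
    omega
  rw [this] at hx
  exact List.mem_of_mem_drop hx

lemma pvTakeMono (cs : List Char) (m m' : Nat) (hm : m ≤ m') (x : Char) (hx : x ∈ cs.take m) :
    x ∈ cs.take m' := by
  have : cs.take m = (cs.take m').take m := by rw [List.take_take, min_eq_left hm]
  rw [this] at hx
  exact List.mem_of_mem_take hx

-- with k < 0, every element of the wrapped-around slice lies in cs.dropLast
lemma pvSliceSubDropLast (cs : List Char) (i k : Int) (h0 : 0 ≤ i) (hk : k < 0)
    (x : Char) (hx : x ∈ PySem.List.slice cs (some i) (some (i + k))) :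
    x ∈ cs.dropLast := by
  rw [List.dropLast_eq_take]
  by_cases hneg : i + k < 0
  · simp only [PySem.List.slice, PySem.List.clampIdx] at hx
    split_ifs at hx
    all_goals
      first
      | (exfalso; omega)
      | (rw [Nat.zero_sub, List.take_zero] at hx; exact absurd hx (List.not_mem_nil))
      | (have ht : ((↑cs.length + (i + k)).toNat - min i.toNat cs.length) ≠ 0 := by
           intro h0'
           rw [h0', List.take_zero] at hx
           exact (List.not_mem_nil) hx
         refine pvTakeMono cs _ _ ?_ x (pvMemTake cs _ _ x hx)
         omega)
  · rw [pvSliceNil cs i k ?_] at hx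
    · exact absurd hx (List.not_mem_nil)
    · simp only [PySem.List.clampIdx]
      split_ifs <;> omega

theorem pvFinal (s : String) (k : Int) (hnD : ¬ D_structure_to_kmer_features s k) :
    structure_to_kmer_features s k = structure_to_kmer_features_alt s k := by
  simp only [structure_to_kmer_features, structure_to_kmer_features_alt]
  by_cases hz : PySem.Str.len s = 0
  · rw [if_pos hz, if_pos hz]
  · rw [if_neg hz, if_neg hz]
    by_cases hg : k ≤ 0 ∨ ((s.toList.length : Int)) < k
    · rw [if_pos hg]
      have hnil : pvAGo s.toList k
          (PySem.List.pyRange 0 ((s.toList.length : Int) - k + 1) 1) [] = [] := by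
        apply pvAGo_eq_of_nobr
        intro i hi c hc
        have hmem := (PySem.List.mem_pyRange_one).mp hi
        have hi0 : 0 ≤ i := hmem.1
        rcases hg with hk0 | hkn
        · rcases lt_or_eq_of_le hk0 with hklt | hkeq
          · by_cases hnk : (s.toList.length : Int) + k ≤ 0
            · rw [pvSliceNil s.toList i k (pvClampLe _ _ _ hi0 hk0 (Or.inr hnk))] at hc
              exact absurd hc (List.not_mem_nil)
            · have hanybr : s.toList.dropLast.any pvIsBr = false := by
                rw [← Bool.not_eq_true]
                intro hany
                exact hnD ⟨hklt, by omega, hany⟩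
              have hcm := pvSliceSubDropLast s.toList i k hi0 hklt c hc
              rw [List.any_eq_false] at hanybr
              exact Bool.eq_false_iff.mpr (hanybr c hcm)
          · rw [pvSliceNil s.toList i k (pvClampLe _ _ _ hi0 hk0 (Or.inl hkeq))] at hc
            exact absurd hc (List.not_mem_nil)
        · exfalso; omega
      rw [hnil, PySem.Chars.join_nil]
    · rw [if_neg hg]
      obtain ⟨hk1, hk2⟩ := not_or.mp hg
      have hk0 : 0 < k := lt_of_not_ge hk1
      have hkn : k ≤ (s.toList.length : Int) := le_of_not_gt hk2
      obtain ⟨K, rfl⟩ : ∃ K : Nat, k = (K : Int) :=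
        ⟨k.toNat, (Int.toNat_of_nonneg (le_of_lt hk0)).symm⟩
      have hK : 1 ≤ K := by exact_mod_cast hk0
      have hKn : K ≤ s.toList.length := by exact_mod_cast hkn
      have hcnt0 : PySem.List.slice s.toList none (some (K : Int))
          = (s.toList.drop 0).take K := by
        rw [PySem.List.slice_to s.toList (by positivity), List.drop_zero, Int.toNat_natCast]
      rw [hcnt0]
      have hmain := pvMain s.toList K hK hKn s.toList.length 0 [] (by omega)
      simp only [Nat.cast_zero] at hmain
      rw [← hmain]

lemma pvAGo_ne_nil_of_acc (cs : List Char) (k : Int) :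
    ∀ (idxs : List Int) (acc : List (List Char)), acc ≠ [] → pvAGo cs k idxs acc ≠ []
  | [], acc, h => h
  | i :: rest, acc, h => by
    simp only [pvAGo]
    split_ifs with hc
    · exact pvAGo_ne_nil_of_acc cs k rest _ (by simp)
    · exact pvAGo_ne_nil_of_acc cs k rest _ h

lemma pvAGo_ne_nil (cs : List Char) (k : Int) :
    ∀ (idxs : List Int) (acc : List (List Char)),
      (∃ i ∈ idxs, ((PySem.List.slice cs (some i) (some (i + k))).contains '('
          || (PySem.List.slice cs (some i) (some (i + k))).contains ')') = true) →
      pvAGo cs k idxs acc ≠ []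
  | [], acc, h => absurd h (by simp)
  | i :: rest, acc, h => by
    simp only [pvAGo]
    split_ifs with hc
    · exact pvAGo_ne_nil_of_acc cs k rest _ (by simp)
    · rcases h with ⟨i', hi', hcond⟩
      rcases List.mem_cons.mp hi' with rfl | hmem
      · exact absurd hcond hc
      · exact pvAGo_ne_nil cs k rest acc ⟨i', hmem, hcond⟩

lemma pvAGo_all_ne_nil (cs : List Char) (k : Int) :
    ∀ (idxs : List Int) (acc : List (List Char)), (∀ x ∈ acc, x ≠ []) →
      ∀ x ∈ pvAGo cs k idxs acc, x ≠ []
  | [], acc, h => h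
  | i :: rest, acc, h => by
    simp only [pvAGo]
    split_ifs with hc
    · refine pvAGo_all_ne_nil cs k rest _ ?_
      intro x hx
      rcases List.mem_append.mp hx with hx | hx
      · exact h x hx
      · rcases List.mem_singleton.mp hx with rfl
        intro hnil
        rw [hnil] at hc
        simp at hc
    · exact pvAGo_all_ne_nil cs k rest acc h

lemma pvMemSlice (cs : List Char) (i k : Int) (p : Nat) (hp : p < cs.length)
    (h0 : 0 ≤ i) (hin : i < (cs.length : Int)) (hik : i + k < 0)
    (hpi : i ≤ (p : Int)) (hpb : (p : Int) < (cs.length : Int) + (i + k)) :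
    cs[p] ∈ PySem.List.slice cs (some i) (some (i + k)) := by
  have ha : PySem.List.clampIdx cs.length i = i.toNat := by
    simp only [PySem.List.clampIdx]; split_ifs <;> omega
  have hb : PySem.List.clampIdx cs.length (i + k) = ((cs.length : Int) + (i + k)).toNat := by
    simp only [PySem.List.clampIdx]; split_ifs <;> omega
  simp only [PySem.List.slice, ha, hb]
  have hgd : ∀ (hh : _), (List.take (((cs.length : Int) + (i + k)).toNat - i.toNat)
      (List.drop i.toNat cs))[p - i.toNat]'hh = cs[p] := by
    intro hh
    rw [List.getElem_take, List.getElem_drop]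
    exact getElem_congr_idx (by omega)
  have hlt : p - i.toNat < (List.take (((cs.length : Int) + (i + k)).toNat - i.toNat)
      (List.drop i.toNat cs)).length := by
    simp [List.length_take, List.length_drop]
    omega
  rw [← hgd hlt]
  exact List.getElem_mem hlt

lemma pvTight (s : String) (k : Int) (hD : D_structure_to_kmer_features s k) :
    structure_to_kmer_features s k ≠ structure_to_kmer_features_alt s k := by
  obtain ⟨hk, hnk, hany⟩ := hD
  -- bracket position p in dropLast
  rw [List.any_eq_true] at hany
  obtain ⟨c, hcmem, hcbr⟩ := hany
  obtain ⟨p, hple, hpeq⟩ := List.getElem_of_mem hcmem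
  have hplen : p < s.toList.length := by
    have := List.length_dropLast (xs := s.toList); omega
  have hpd : s.toList.dropLast[p]'hple = s.toList[p]'hplen := List.getElem_dropLast ..
  have hpbr : pvIsBr (s.toList[p]'hplen) = true := by
    rw [← hpd, hpeq]; exact hcbr
  have hp2 : (p : Int) ≤ (s.toList.length : Int) - 2 := by
    have hdl : s.toList.dropLast.length = s.toList.length - 1 := by simp
    omega
  have hne : s.toList.length ≠ 0 := by omega
  have hlen0 : ¬ PySem.Str.len s = 0 := by
    rw [PySem.Str.len_eq]
    omega
  -- B = ""
  have hB : structure_to_kmer_features_alt s k = "" := by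
    simp only [structure_to_kmer_features_alt]
    rw [if_neg hlen0, if_pos (Or.inl (le_of_lt hk))]
  -- witness window index
  set n : Int := (s.toList.length : Int) with hn
  set i : Int := max 0 ((p : Int) - (n + k) + 1) with hi
  have hi0 : 0 ≤ i := le_max_left _ _
  have hcase := max_choice (0 : Int) ((p : Int) - (n + k) + 1)
  have hipe : i ≤ (p : Int) := by
    rcases hcase with h | h <;> rw [hi, h] <;> omega
  have hiub : (p : Int) < n + (i + k) := by
    rcases hcase with h | h <;> rw [hi, h] <;> omega
  have hik : i + k < 0 := by
    rcases hcase with h | h <;> rw [hi, h] <;> omega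
  have hin : i < n := by omega
  have hA : structure_to_kmer_features s k ≠ "" := by
    simp only [structure_to_kmer_features]
    rw [if_neg hlen0]
    have hsmem : s.toList[p]'hplen ∈ PySem.List.slice s.toList (some i) (some (i + k)) :=
      pvMemSlice s.toList i k p hplen hi0 hin hik hipe hiub
    have hcond : ((PySem.List.slice s.toList (some i) (some (i + k))).contains '('
        || (PySem.List.slice s.toList (some i) (some (i + k))).contains ')') = true := by
      rw [pvBr_iff, Int.lt_iff_add_one_le]
      norm_num
      exact ⟨_, hsmem, hpbr⟩
    have hirange : i ∈ PySem.List.pyRange 0 (n - k + 1) 1 := by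
      rw [PySem.List.mem_pyRange_one]
      constructor
      · exact hi0
      · omega
    have hkm : pvAGo s.toList k (PySem.List.pyRange 0 (n - k + 1) 1) [] ≠ [] :=
      pvAGo_ne_nil s.toList k _ [] ⟨i, hirange, hcond⟩
    have hall : ∀ x ∈ pvAGo s.toList k (PySem.List.pyRange 0 (n - k + 1) 1) [], x ≠ [] :=
      pvAGo_all_ne_nil s.toList k _ [] (by simp)
    intro hcontra
    rcases hx : pvAGo s.toList k (PySem.List.pyRange 0 (n - k + 1) 1) [] with _ | ⟨x, rest⟩
    · exact hkm hx
    · have hxne : x ≠ [] := hall x (by rw [hx]; exact List.mem_cons_self ..)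
      rw [hx] at hcontra
      have hjoin : PySem.Chars.join [' '] (x :: rest) ≠ [] := by
        rcases rest with _ | ⟨y, rest'⟩
        · rw [PySem.Chars.join_singleton]; exact hxne
        · rw [PySem.Chars.join_cons_cons]
          simp
      have htl := congrArg String.toList hcontra
      simp only [] at htl
      exact hjoin (by simpa using htl)
  rw [hB]; exact hA

-- ===== VERDICT =====
theorem structure_to_kmer_features_spec : Claim_unchanged_structure_to_kmer_features := by
  intro structure_ k _ hnD
  exact pvFinal structure_ k hnD

theorem structure_to_kmer_features_changed : Claim_changed_structure_to_kmer_features := by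
  unfold Claim_changed_structure_to_kmer_features; decide

theorem structure_to_kmer_features_tight : Claim_exact_structure_to_kmer_features := by
  intro structure_ k _ hD
  exact pvTight structure_ k hD
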